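-- pv_equiv track=rewrite | github.com/Pang-HQ/PangCrypter | pangcrypter/updater/service.py | _get_minisig_asset
-- ===== SOURCE A (Python) =====
-- from typing import Any, Dict, List, Optional, Tuple
--
-- def _get_minisig_asset(release: Dict[str, Any], zip_name: str) -> Optional[str]:
--     exact = f"{zip_name}.minisig".lower()
--     for asset in release.get("assets", []):
--         name = asset.get("name", "").lower()
--         if name == exact:
--             return asset["browser_download_url"]
--
--     for asset in release.get("assets", []):
--         name = asset.get("name", "").lower()
--         if name.endswith(".minisig") and zip_name.lower() in name:
--             return asset["browser_download_url"]
--     return None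
-- ===== SOURCE B (Python) =====
-- def _get_minisig_asset(release, zip_name):
--     exact = f"{zip_name}.minisig".lower()
--     zl = zip_name.lower()
--     candidates = []
--     for i, asset in enumerate(release.get("assets", [])):
--         name = asset.get("name", "").lower()
--         if name == exact:
--             candidates.append((0, i, asset))
--         elif name.endswith(".minisig") and zl in name:
--             candidates.append((1, i, asset))
--     if not candidates:
--         return None
--     best = min(candidates, key=lambda c: (c[0], c[1]))
--     return best[2]["browser_download_url"]
-- ===== Notes on version B (the rewrite author's own statement) =====
-- stated objective: alternative
-- what changed: Replaces A's two staged early-return scans by a score-and-select algorithm: one enumerate pass collects every matching asset as a (rank, index, asset) candidate (rank 0 = exact name, rank 1 = minisig fallback), and the winner is chosen with min over the (rank, index) key.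
import Mathlib
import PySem

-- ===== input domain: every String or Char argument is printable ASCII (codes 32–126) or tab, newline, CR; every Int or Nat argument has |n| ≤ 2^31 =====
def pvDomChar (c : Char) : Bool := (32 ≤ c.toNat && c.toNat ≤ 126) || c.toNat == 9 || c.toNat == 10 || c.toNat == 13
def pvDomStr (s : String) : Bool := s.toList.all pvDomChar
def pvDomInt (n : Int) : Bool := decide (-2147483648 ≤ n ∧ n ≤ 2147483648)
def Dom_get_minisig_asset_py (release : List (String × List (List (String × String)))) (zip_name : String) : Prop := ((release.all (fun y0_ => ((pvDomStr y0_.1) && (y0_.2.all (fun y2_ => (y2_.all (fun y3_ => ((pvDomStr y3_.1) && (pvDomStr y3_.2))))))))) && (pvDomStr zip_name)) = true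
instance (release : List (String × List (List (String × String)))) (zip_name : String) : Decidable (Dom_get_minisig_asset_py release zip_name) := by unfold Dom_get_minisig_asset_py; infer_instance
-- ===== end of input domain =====

-- B replaces A's two staged early-return scans by score-and-select: one enumerate pass
-- collects (rank, index, asset) candidates, the winner is min by (rank, index) (objective: alternative).

-- ===== PORT A =====
-- first loop of A: scan for an asset whose lowered name equals `exact`
def pvLoop1 (exact : String) : List (List (String × String)) → Option String
  | [] => none
  | a :: rest =>
    let name := PySem.Str.lower ((PySem.Dict.mk a).getD "name" "")
    if name == exact then
      -- asset["browser_download_url"]: exact under Pre_ (the key is present on the asset A returns)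
      some ((PySem.Dict.mk a).getD "browser_download_url" "")
    else pvLoop1 exact rest

-- second loop of A: scan for a `.minisig` asset whose name contains the lowered zip name
def pvLoop2 (zl : String) : List (List (String × String)) → Option String
  | [] => none
  | a :: rest =>
    let name := PySem.Str.lower ((PySem.Dict.mk a).getD "name" "")
    if PySem.Str.endswith name ".minisig" && PySem.Str.isIn zl name then
      some ((PySem.Dict.mk a).getD "browser_download_url" "")
    else pvLoop2 zl rest

def get_minisig_asset_py (release : List (String × List (List (String × String)))) (zip_name : String) : Option String :=
  let exact := PySem.Str.lower (zip_name ++ ".minisig")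
  let assets := (PySem.Dict.mk release).getD "assets" []
  match pvLoop1 exact assets with
  | some u => some u
  | none => pvLoop2 (PySem.Str.lower zip_name) assets

-- ===== PORT B =====
-- the enumerate loop of B: collect (rank, index, asset) candidates
def pvCands (exact zl : String) : Nat → List (List (String × String)) → List (Nat × Nat × List (String × String))
  | _, [] => []
  | i, a :: rest =>
    let name := PySem.Str.lower ((PySem.Dict.mk a).getD "name" "")
    if name == exact then (0, i, a) :: pvCands exact zl (i + 1) rest
    else if PySem.Str.endswith name ".minisig" && PySem.Str.isIn zl name then
      (1, i, a) :: pvCands exact zl (i + 1) rest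
    else pvCands exact zl (i + 1) rest

-- one step of min(candidates, key=lambda c: (c[0], c[1])): Python's min keeps the first minimum
def pvMinStep (b c : Nat × Nat × List (String × String)) : Nat × Nat × List (String × String) :=
  if c.1 < b.1 || (c.1 == b.1 && c.2.1 < b.2.1) then c else b

def get_minisig_asset_py_alt (release : List (String × List (List (String × String)))) (zip_name : String) : Option String :=
  let exact := PySem.Str.lower (zip_name ++ ".minisig")
  let zl := PySem.Str.lower zip_name
  match pvCands exact zl 0 ((PySem.Dict.mk release).getD "assets" []) with
  | [] => none
  | c :: rest =>
    let best := rest.foldl pvMinStep c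
    -- best[2]["browser_download_url"]: exact under Pre_ (the key is present on the winning asset)
    some ((PySem.Dict.mk best.2.2).getD "browser_download_url" "")

-- ===== PRECONDITION & SPEC =====
-- Pre_ excludes exactly the inputs on which the Python A raises KeyError: the asset A would
-- return (first exact-name match, else first minisig fallback) lacks "browser_download_url".
-- B raises there too; on every other input A returns normally and Pre_ admits it.
def Pre_get_minisig_asset_py (release : List (String × List (List (String × String)))) (zip_name : String) : Prop :=
  let assets := (PySem.Dict.mk release).getD "assets" []
  let exact := PySem.Str.lower (zip_name ++ ".minisig")
  let zl := PySem.Str.lower zip_name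
  (match assets.find? (fun a => PySem.Str.lower ((PySem.Dict.mk a).getD "name" "") == exact) with
   | some a => ((PySem.Dict.mk a).get? "browser_download_url").isSome
   | none =>
     match assets.find? (fun a =>
         PySem.Str.endswith (PySem.Str.lower ((PySem.Dict.mk a).getD "name" "")) ".minisig"
           && PySem.Str.isIn zl (PySem.Str.lower ((PySem.Dict.mk a).getD "name" ""))) with
     | some a => ((PySem.Dict.mk a).get? "browser_download_url").isSome
     | none => true) = true
instance (release : List (String × List (List (String × String)))) (zip_name : String) : Decidable (Pre_get_minisig_asset_py release zip_name) := by unfold Pre_get_minisig_asset_py; infer_instance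

def pvWitness_get_minisig_asset_py : (List (String × List (List (String × String)))) × String :=
  ([("assets", [[("name", "Pkg.zip.minisig"), ("browser_download_url", "http://u1")]])], "pkg.zip")

def Spec_get_minisig_asset_py (release : List (String × List (List (String × String)))) (zip_name : String) (out : Option String) : Prop := out = get_minisig_asset_py_alt release zip_name
instance (release : List (String × List (List (String × String)))) (zip_name : String) (out : Option String) : Decidable (Spec_get_minisig_asset_py release zip_name out) := by unfold Spec_get_minisig_asset_py; infer_instance

-- ===== CLAIM (what is proved, stated in full; the proofs are below) =====
def Claim_equal_get_minisig_asset_py : Prop := ∀ (release : List (String × List (List (String × String)))) (zip_name : String), Dom_get_minisig_asset_py release zip_name → Pre_get_minisig_asset_py release zip_name → Spec_get_minisig_asset_py release zip_name (get_minisig_asset_py release zip_name)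

-- ===== LEMMAS AND PROOFS =====
-- every candidate has index ≥ the starting counter and rank 0 or 1
theorem pvCands_mem (exact zl : String) : ∀ (l : List (List (String × String))) (i : Nat)
    (c : Nat × Nat × List (String × String)), c ∈ pvCands exact zl i l →
    i ≤ c.2.1 ∧ (c.1 = 0 ∨ c.1 = 1) := by
  intro l
  induction l with
  | nil => intro i c h; simp [pvCands] at h
  | cons a rest ih =>
    intro i c h
    simp only [pvCands] at h
    split at h
    · rcases List.mem_cons.mp h with h | h
      · subst h; simp
      · rcases ih (i + 1) c h with ⟨h1, h2⟩; exact ⟨by omega, h2⟩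
    · split at h
      · rcases List.mem_cons.mp h with h | h
        · subst h; simp
        · rcases ih (i + 1) c h with ⟨h1, h2⟩; exact ⟨by omega, h2⟩
      · rcases ih (i + 1) c h with ⟨h1, h2⟩; exact ⟨by omega, h2⟩

-- candidate indices are strictly increasing
theorem pvCands_pairwise (exact zl : String) : ∀ (l : List (List (String × String))) (i : Nat),
    List.Pairwise (fun x y => x.2.1 < y.2.1) (pvCands exact zl i l) := by
  intro l
  induction l with
  | nil => intro i; simp [pvCands]
  | cons a rest ih =>
    intro i
    simp only [pvCands]
    split
    · exact List.Pairwise.cons (fun c hc => by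
        have := (pvCands_mem exact zl rest (i + 1) c hc).1; simpa using by omega) (ih (i + 1))
    · split
      · exact List.Pairwise.cons (fun c hc => by
          have := (pvCands_mem exact zl rest (i + 1) c hc).1; simpa using by omega) (ih (i + 1))
      · exact ih (i + 1)

-- the fold computing min by (rank, index) finds the first strictly better-ranked candidate,
-- given ranks in {0,1} and strictly increasing indices starting above b's
theorem pvFoldMin : ∀ (l : List (Nat × Nat × List (String × String)))
    (b : Nat × Nat × List (String × String)),
    (∀ c ∈ l, c.1 = 0 ∨ c.1 = 1) → (b.1 = 0 ∨ b.1 = 1) →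
    (∀ c ∈ l, b.2.1 < c.2.1) → List.Pairwise (fun x y => x.2.1 < y.2.1) l →
    l.foldl pvMinStep b = ((l.find? (fun c => decide (c.1 < b.1))).getD b) := by
  intro l
  induction l with
  | nil => intro b _ _ _ _; simp
  | cons c rest ih =>
    intro b hr hb hidx hpw
    rcases List.pairwise_cons.mp hpw with ⟨hchead, hptail⟩
    by_cases hlt : c.1 < b.1
    · have hstep : pvMinStep b c = c := by simp [pvMinStep, hlt]
      have hc0 : c.1 = 0 := by
        rcases hr c (by simp) with h | h
        · exact h
        · rcases hb with h' | h' <;> omega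
      have : rest.foldl pvMinStep c = c := by
        rw [ih c (fun d hd => hr d (by simp [hd])) (Or.inl hc0) hchead hptail]
        have : rest.find? (fun d => decide (d.1 < c.1)) = none := by
          rw [List.find?_eq_none]
          intro d _; simp [hc0]
        simp [this]
      simp only [List.foldl_cons, hstep, this, List.find?_cons]
      simp [hlt]
    · have hstep : pvMinStep b c = b := by
        have : ¬ c.2.1 < b.2.1 := by have := hidx c (by simp); omega
        simp [pvMinStep, hlt, this]
      have hfind : List.find? (fun d => decide (d.1 < b.1)) (c :: rest)
          = rest.find? (fun d => decide (d.1 < b.1)) := by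
        rw [List.find?_cons]; simp [hlt]
      simp only [List.foldl_cons, hstep, hfind]
      exact ih b (fun d hd => hr d (by simp [hd])) hb (fun d hd => hidx d (by simp [hd])) hptail

-- the first rank-0 candidate is exactly the asset A's first loop returns
theorem pvFind0 (exact zl : String) : ∀ (l : List (List (String × String))) (i : Nat),
    Option.map (fun c => (PySem.Dict.mk c.2.2).getD "browser_download_url" "")
      ((pvCands exact zl i l).find? (fun c => decide (c.1 < 1))) = pvLoop1 exact l := by
  intro l
  induction l with
  | nil => intro i; simp [pvCands, pvLoop1]
  | cons a rest ih =>
    intro i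
    simp only [pvCands, pvLoop1]
    by_cases hx : (PySem.Str.lower ((PySem.Dict.mk a).getD "name" "") == exact) = true
    · rw [if_pos hx, if_pos hx, List.find?_cons]; simp
    · rw [if_neg hx, if_neg hx]
      split
      · rw [List.find?_cons]; simpa using ih (i + 1)
      · exact ih (i + 1)

-- B's select-from-candidates equals A's staged scans (unconditionally on the Lean ports)
theorem pvMain (exact zl : String) : ∀ (l : List (List (String × String))) (i : Nat),
    (match pvCands exact zl i l with
     | [] => (none : Option String)
     | c :: rest => some ((PySem.Dict.mk (rest.foldl pvMinStep c).2.2).getD "browser_download_url" ""))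
    = ((pvLoop1 exact l).or (pvLoop2 zl l)) := by
  intro l
  induction l with
  | nil => intro i; simp [pvCands, pvLoop1, pvLoop2]
  | cons a rest ih =>
    intro i
    simp only [pvCands, pvLoop1, pvLoop2]
    by_cases hx : (PySem.Str.lower ((PySem.Dict.mk a).getD "name" "") == exact) = true
    · rw [if_pos hx, if_pos hx]
      have hfold : (pvCands exact zl (i + 1) rest).foldl pvMinStep (0, i, a) = (0, i, a) := by
        rw [pvFoldMin _ _ (fun c hc => (pvCands_mem exact zl rest (i + 1) c hc).2) (Or.inl rfl)
          (fun c hc => by have := (pvCands_mem exact zl rest (i + 1) c hc).1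
                          show i < c.2.1; omega)
          (pvCands_pairwise exact zl rest (i + 1))]
        have hnone : (pvCands exact zl (i + 1) rest).find? (fun c => decide (c.1 < 0)) = none := by
          rw [List.find?_eq_none]; intro d _; simp
        rw [hnone]
        rfl
      simp [hfold]
    · rw [if_neg hx, if_neg hx]
      by_cases hc : (PySem.Str.endswith (PySem.Str.lower ((PySem.Dict.mk a).getD "name" "")) ".minisig"
          && PySem.Str.isIn zl (PySem.Str.lower ((PySem.Dict.mk a).getD "name" ""))) = true
      · rw [if_pos hc, if_pos hc]
        have hfold : (pvCands exact zl (i + 1) rest).foldl pvMinStep (1, i, a)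
            = (((pvCands exact zl (i + 1) rest).find? (fun c => decide (c.1 < 1))).getD (1, i, a)) := by
          exact pvFoldMin _ _ (fun c hc => (pvCands_mem exact zl rest (i + 1) c hc).2) (Or.inr rfl)
            (fun c hc => by have := (pvCands_mem exact zl rest (i + 1) c hc).1
                            show i < c.2.1; omega)
            (pvCands_pairwise exact zl rest (i + 1))
        have hfind := pvFind0 exact zl rest (i + 1)
        show some ((PySem.Dict.mk ((pvCands exact zl (i + 1) rest).foldl pvMinStep (1, i, a)).2.2).getD "browser_download_url" "") = _
        rw [hfold]
        cases hf : (pvCands exact zl (i + 1) rest).find? (fun c => decide (c.1 < 1)) with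
        | none =>
          rw [hf] at hfind
          simp only [Option.map_none] at hfind
          rw [← hfind]
          rfl
        | some c =>
          rw [hf] at hfind
          simp only [Option.map_some] at hfind
          rw [← hfind]
          rfl
      · rw [if_neg hc, if_neg hc]
        exact ih (i + 1)

-- ===== VERDICT (by name: the statement is the Claim_ definition above) =====
theorem get_minisig_asset_py_spec : Claim_equal_get_minisig_asset_py := by
  intro release zip_name _ _
  unfold Spec_get_minisig_asset_py get_minisig_asset_py get_minisig_asset_py_alt
  rw [pvMain]
  cases h : pvLoop1 (PySem.Str.lower (zip_name ++ ".minisig")) ((PySem.Dict.mk release).getD "assets" []) <;> simp [h]
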